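-- pv_equiv track=rewrite | github.com/manya-lalwani/sciRNA-demultiplex-tool | demultiplex_tool.py | one_off
-- ===== SOURCE A (Python) =====
-- def how_many_off(sequence, barcode):
--     '''Input: sequence to compare to barcode, barcode (must be of same length)
--         Output: number of nucleotides in sequence that must be changed to match barcode'''
--     assert len(sequence) == len(barcode)
--     count = 0
--     for nuc in range(0, len(sequence)):
--         if sequence[nuc] != barcode[nuc]:
--             count += 1
--     return count
--
-- def one_off(sequence, barcode, barcode_length, type, diff = 1):
--     '''Input: R1 sequence, expected barcode, expected length of barcode, type of barcode (rt or lig), # of nucleotides off from expected barcode to be a match (default 1)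
--         Output: if sequence has 1 (or diff) off match to expected barcode, returns expected barcode and start position index of match. Otherwise returns None, None
--         RT: returns last match in sequence
--         Lig: returns first match in sequence'''
--
--     range_dict = {'rt': [len(sequence)-barcode_length, -1, -1], 'lig': [0, len(sequence)-barcode_length+1,1]}
--     start, stop, step = range_dict[type]
--
--     for i in range(start, stop, step):
--         subseq = sequence[i:i + barcode_length]
--         if how_many_off(subseq, barcode) <= diff:
--             return barcode, i
--
--     return None, None
-- ===== SOURCE B (Python) =====
-- def one_off(sequence, barcode, barcode_length, type, diff=1):
--     if type not in ('rt', 'lig'):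
--         raise KeyError(type)
--     first = last = None
--     for i in range(0, len(sequence) - barcode_length + 1):
--         window = sequence[i:i + barcode_length]
--         if sum(a != b for a, b in zip(window, barcode)) <= diff:
--             if first is None:
--                 first = i
--             last = i
--     pos = first if type == 'lig' else last
--     return (barcode, pos) if pos is not None else (None, None)
-- ===== Notes on version B (the rewrite author's own statement) =====
-- stated objective: alternative
-- what changed: A picks a scan direction from a dict (backward for 'rt', forward for 'lig') and early-returns at the first hit; B does one forward fold over all windows tracking the first and last matching start index and selects first for 'lig', last for 'rt'.
-- outside the precondition, e.g. on one_off('', '', -1, 'lig', 1): A returns ('', 0), B returns ('', 0)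
import Mathlib
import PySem

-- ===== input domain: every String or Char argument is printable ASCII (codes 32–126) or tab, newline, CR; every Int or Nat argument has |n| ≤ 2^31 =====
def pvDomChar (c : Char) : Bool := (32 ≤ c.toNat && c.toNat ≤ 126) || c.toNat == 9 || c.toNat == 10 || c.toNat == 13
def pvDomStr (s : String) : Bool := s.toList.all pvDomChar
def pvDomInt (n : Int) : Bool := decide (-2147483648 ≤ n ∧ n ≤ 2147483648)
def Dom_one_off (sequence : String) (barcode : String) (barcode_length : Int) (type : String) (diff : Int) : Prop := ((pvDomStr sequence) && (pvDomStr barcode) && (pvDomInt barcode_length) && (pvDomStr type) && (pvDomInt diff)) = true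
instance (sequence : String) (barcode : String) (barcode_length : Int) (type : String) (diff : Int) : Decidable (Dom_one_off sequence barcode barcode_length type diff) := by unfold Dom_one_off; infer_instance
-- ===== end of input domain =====

-- B replaces A's dict-driven directional scan (backward for 'rt', forward for 'lig', stopping at
-- the first hit) by a single forward fold that tracks the first and last matching window; objective: alternative decomposition.

-- ===== PORT A =====

-- assert len(sequence) == len(barcode): `none` models the AssertionError
def howManyOff (sequence : String) (barcode : String) : Option Int :=
  if sequence.toList.length = barcode.toList.length then
    some ((PySem.List.pyRange 0 (PySem.Str.len sequence) 1).foldl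
      (fun count nuc =>
        if PySem.Str.pyGet? sequence nuc ≠ PySem.Str.pyGet? barcode nuc then count + 1 else count) 0)
  else none

-- the `for i in range(start, stop, step)` loop of A, with its early return
def oneOffGo (sequence : String) (barcode : String) (barcode_length : Int) (diff : Int) :
    List Int → Option String × Option Int
  | [] => (none, none)
  | i :: rest =>
    let subseq := PySem.Str.slice sequence (some i) (some (i + barcode_length))
    match howManyOff subseq barcode with
    | none => (none, none)   -- AssertionError in Python; such inputs are outside Pre_one_off
    | some c =>
      if c ≤ diff then (some barcode, some i)
      else oneOffGo sequence barcode barcode_length diff rest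

def one_off (sequence : String) (barcode : String) (barcode_length : Int) (type : String) (diff : Int) : Option String × Option Int :=
  let range_dict : PySem.Dict String (Int × Int × Int) :=
    PySem.Dict.ofList
      [("rt", (PySem.Str.len sequence - barcode_length, -1, -1)),
       ("lig", (0, PySem.Str.len sequence - barcode_length + 1, 1))]
  match PySem.Dict.get? range_dict type with
  | none => (none, none)   -- KeyError in Python; such inputs are outside Pre_one_off
  | some (start, stop, step) =>
    oneOffGo sequence barcode barcode_length diff (PySem.List.pyRange start stop step)

-- ===== PORT B =====

-- sum(a != b for a, b in zip(window, barcode))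
def bMismatches (pairs : List (Char × Char)) : Int :=
  pairs.foldl (fun c p => if p.1 ≠ p.2 then c + 1 else c) 0

def one_off_alt (sequence : String) (barcode : String) (barcode_length : Int) (type : String) (diff : Int) : Option String × Option Int :=
  if type ≠ "rt" ∧ type ≠ "lig" then (none, none)   -- raise KeyError(type); outside Pre_one_off
  else
    let fl := (PySem.List.pyRange 0 (PySem.Str.len sequence - barcode_length + 1) 1).foldl
      (fun (fl : Option Int × Option Int) i =>
        let window := PySem.Str.slice sequence (some i) (some (i + barcode_length))
        if bMismatches (window.toList.zip barcode.toList) ≤ diff then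
          ((if fl.1 = none then some i else fl.1), some i)
        else fl)
      (none, none)
    let pos := if type = "lig" then fl.1 else fl.2
    match pos with
    | some p => (some barcode, some p)
    | none => (none, none)

-- ===== PRECONDITION & SPEC =====
-- Pre_ excludes: type other than 'rt'/'lig' (A raises KeyError), and barcode_length that is negative
-- or differs from len(barcode) while the scan has windows to visit (A's assert in how_many_off then
-- fires on the first wrong-length window of its scan direction, so whether A raises or returns is an
-- accident of the data and of the scan order).
def Pre_one_off (sequence : String) (barcode : String) (barcode_length : Int) (type : String) (diff : Int) : Prop :=
  (type = "rt" ∨ type = "lig") ∧ 0 ≤ barcode_length ∧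
  (barcode_length = (barcode.toList.length : Int) ∨ (sequence.toList.length : Int) < barcode_length)
instance (sequence : String) (barcode : String) (barcode_length : Int) (type : String) (diff : Int) : Decidable (Pre_one_off sequence barcode barcode_length type diff) := by unfold Pre_one_off; infer_instance

def pvWitness_one_off : String × String × Int × String × Int := ("ACGT", "CG", 2, "lig", 1)

def Spec_one_off (sequence : String) (barcode : String) (barcode_length : Int) (type : String) (diff : Int) (out : Option String × Option Int) : Prop := out = one_off_alt sequence barcode barcode_length type diff
instance (sequence : String) (barcode : String) (barcode_length : Int) (type : String) (diff : Int) (out : Option String × Option Int) : Decidable (Spec_one_off sequence barcode barcode_length type diff out) := by unfold Spec_one_off; infer_instance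

-- ===== CLAIM (what is proved, stated in full; the proofs are below) =====
def Claim_equal_one_off : Prop := ∀ (sequence : String) (barcode : String) (barcode_length : Int) (type : String) (diff : Int), Dom_one_off sequence barcode barcode_length type diff → Pre_one_off sequence barcode barcode_length type diff → Spec_one_off sequence barcode barcode_length type diff (one_off sequence barcode barcode_length type diff)

-- ===== LEMMAS AND PROOFS =====

-- A's index loop equals "first index within diff", provided no window trips the assert.
theorem oneOffGo_eq_find (sequence barcode : String) (bl diff : Int) (g : Int → Int) (L : List Int)
    (h : ∀ i ∈ L,
      howManyOff (PySem.Str.slice sequence (some i) (some (i + bl))) barcode = some (g i)) :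
    oneOffGo sequence barcode bl diff L =
      match L.find? (fun i => decide (g i ≤ diff)) with
      | some i => (some barcode, some i)
      | none => (none, none) := by
  induction L with
  | nil => rfl
  | cons i rest ih =>
    have hi := h i (by simp)
    simp only [oneOffGo, hi, List.find?_cons]
    by_cases hle : g i ≤ diff
    · simp [hle]
    · rw [ih (fun j hj => h j (by simp [hj]))]
      simp [hle]

-- B's fold computes (first match, last match) of the index list.
theorem altFold (sequence barcode : String) (bl diff : Int) (L : List Int) (f l : Option Int) :
    L.foldl (fun (fl : Option Int × Option Int) i =>
        let window := PySem.Str.slice sequence (some i) (some (i + bl))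
        if bMismatches (window.toList.zip barcode.toList) ≤ diff then
          ((if fl.1 = none then some i else fl.1), some i)
        else fl) (f, l)
      = (f.or (L.find? (fun i => decide (bMismatches ((PySem.Str.slice sequence (some i) (some (i + bl))).toList.zip barcode.toList) ≤ diff))),
         ((L.reverse.find? (fun i => decide (bMismatches ((PySem.Str.slice sequence (some i) (some (i + bl))).toList.zip barcode.toList) ≤ diff))).or l)) := by
  induction L generalizing f l with
  | nil => simp
  | cons i rest ih =>
    simp only [List.foldl_cons, List.reverse_cons, List.find?_cons, List.find?_append]
    by_cases hp : bMismatches ((PySem.Str.slice sequence (some i) (some (i + bl))).toList.zip barcode.toList) ≤ diff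
    all_goals simp only [PySem.Str.toList_slice, PySem.Chars.slice_eq_listSlice] at hp
    · rw [if_pos (by simpa using hp), ih]
      rcases f with _ | v <;>
        cases rest.reverse.find? (fun i => decide (bMismatches ((PySem.Str.slice sequence (some i) (some (i + bl))).toList.zip barcode.toList) ≤ diff)) <;>
        simp [hp, Option.or]
    · rw [if_neg (by simpa using hp), ih]
      cases rest.reverse.find? (fun i => decide (bMismatches ((PySem.Str.slice sequence (some i) (some (i + bl))).toList.zip barcode.toList) ≤ diff)) <;>
        simp [hp, Option.or]

-- the window sequence[i:i+bl] for 0 ≤ i ≤ len - bl has length exactly bl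
theorem window_length (s : List Char) (i bl : Int) (h0 : 0 ≤ i) (hb : 0 ≤ bl)
    (hle : i + bl ≤ (s.length : Int)) :
    (PySem.List.slice s (some i) (some (i + bl))).length = bl.toNat := by
  rw [PySem.List.length_slice]
  have h1 : PySem.List.clampIdx s.length i = i.toNat := by
    rw [show i = ((i.toNat : Nat) : Int) by omega, PySem.List.clampIdx_natCast]; omega
  have h2 : PySem.List.clampIdx s.length (i + bl) = i.toNat + bl.toNat := by
    rw [show i + bl = (((i.toNat + bl.toNat : Nat)) : Int) by omega, PySem.List.clampIdx_natCast]
    omega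
  omega

theorem count_eq_zip (s b : List Char) (h : s.length = b.length) (c : Int) :
    (List.range s.length).foldl (fun c k => if s[k]? ≠ b[k]? then c + 1 else c) c
      = (s.zip b).foldl (fun c p => if p.1 ≠ p.2 then c + 1 else c) c := by
  induction s generalizing b c with
  | nil => simp
  | cons x s' ih =>
    cases b with
    | nil => simp at h
    | cons y b' =>
      simp only [List.length_cons, List.range_succ_eq_map, List.foldl_cons, List.zip_cons_cons]
      rw [List.foldl_map]
      simp only [List.getElem?_cons_zero, List.getElem?_cons_succ, ne_eq, Option.some.injEq]
      exact ih b' (by simpa using h) _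

theorem howManyOff_eq (w b : String) (h : w.toList.length = b.toList.length) :
    howManyOff w b = some (bMismatches (w.toList.zip b.toList)) := by
  unfold howManyOff bMismatches
  rw [if_pos h]
  congr 1
  rw [show PySem.Str.len w = ((w.toList.length : Nat) : Int) by simp [PySem.Str.len_eq],
      PySem.List.pyRange_zero_natCast, List.foldl_map]
  simp only [PySem.Str.pyGet?_natCast]
  exact count_eq_zip w.toList b.toList h 0

-- every window the scan visits has barcode's length, so A's assert never fires
theorem hwin (sequence barcode : String) (bl i : Int) (hb : 0 ≤ bl)
    (hbl : bl = (barcode.toList.length : Int)) (h0 : 0 ≤ i)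
    (hle : i + bl ≤ (sequence.toList.length : Int)) :
    howManyOff (PySem.Str.slice sequence (some i) (some (i + bl))) barcode
      = some (bMismatches ((PySem.Str.slice sequence (some i) (some (i + bl))).toList.zip barcode.toList)) := by
  apply howManyOff_eq
  rw [PySem.Str.toList_slice, PySem.Chars.slice_eq_listSlice,
      window_length sequence.toList i bl h0 hb hle]
  omega

-- unfolding equations for the two entry points, one per branch of the type dispatch
theorem one_off_rt (sequence barcode : String) (bl diff : Int) :
    one_off sequence barcode bl "rt" diff
      = oneOffGo sequence barcode bl diff
          (PySem.List.pyRange (PySem.Str.len sequence - bl) (-1) (-1)) := rfl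

theorem one_off_lig (sequence barcode : String) (bl diff : Int) :
    one_off sequence barcode bl "lig" diff
      = oneOffGo sequence barcode bl diff
          (PySem.List.pyRange 0 (PySem.Str.len sequence - bl + 1) 1) := rfl

theorem one_off_alt_body (sequence barcode : String) (bl diff : Int) (t : String)
    (ht : t = "rt" ∨ t = "lig") :
    one_off_alt sequence barcode bl t diff
      = (let fl := (PySem.List.pyRange 0 (PySem.Str.len sequence - bl + 1) 1).foldl
            (fun (fl : Option Int × Option Int) i =>
              let window := PySem.Str.slice sequence (some i) (some (i + bl))
              if bMismatches (window.toList.zip barcode.toList) ≤ diff then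
                ((if fl.1 = none then some i else fl.1), some i)
              else fl)
            (none, none)
         let pos := if t = "lig" then fl.1 else fl.2
         match pos with
         | some p => (some barcode, some p)
         | none => (none, none)) := by
  unfold one_off_alt
  rcases ht with h | h <;> subst h <;> rfl

-- ===== VERDICT (by name: the statement is the Claim_ definition above) =====
theorem one_off_spec : Claim_equal_one_off := by
  intro sequence barcode bl type diff _hdom hpre
  obtain ⟨htype, hbl0, hlen⟩ := hpre
  unfold Spec_one_off
  have hslen : PySem.Str.len sequence = (sequence.toList.length : Int) := by
    simp [PySem.Str.len_eq]
  rw [one_off_alt_body sequence barcode bl diff type htype]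
  simp only [hslen]
  rcases hlen with hbl | hnb
  · -- barcode_length = len(barcode): the real scan
    have hL : ∀ i ∈ PySem.List.pyRange 0 ((sequence.toList.length : Int) - bl + 1) 1,
        howManyOff (PySem.Str.slice sequence (some i) (some (i + bl))) barcode
          = some (bMismatches ((PySem.Str.slice sequence (some i) (some (i + bl))).toList.zip barcode.toList)) := by
      intro i hi
      rw [PySem.List.mem_pyRange_one] at hi
      exact hwin sequence barcode bl i hbl0 hbl hi.1 (by omega)
    rw [altFold]
    rcases htype with h | h <;> subst h
    · -- "rt": A scans backward, first backward hit = B's last forward hit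
      rw [one_off_rt, hslen,
          show PySem.List.pyRange ((sequence.toList.length : Int) - bl) (-1) (-1)
            = (PySem.List.pyRange 0 ((sequence.toList.length : Int) - bl + 1) 1).reverse by
            rw [PySem.List.pyRange_neg_one_eq_reverse]; norm_num,
          oneOffGo_eq_find sequence barcode bl diff
            (fun i => bMismatches ((PySem.Str.slice sequence (some i) (some (i + bl))).toList.zip barcode.toList))
            _ (fun i hi => hL i (List.mem_reverse.mp hi))]
      cases (PySem.List.pyRange 0 ((sequence.toList.length : Int) - bl + 1) 1).reverse.find?
          (fun i => decide (bMismatches ((PySem.Str.slice sequence (some i) (some (i + bl))).toList.zip barcode.toList) ≤ diff)) <;>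
        simp [Option.or]
    · -- "lig": both take the first forward hit
      rw [one_off_lig, hslen,
          oneOffGo_eq_find sequence barcode bl diff
            (fun i => bMismatches ((PySem.Str.slice sequence (some i) (some (i + bl))).toList.zip barcode.toList))
            _ hL]
      cases (PySem.List.pyRange 0 ((sequence.toList.length : Int) - bl + 1) 1).find?
          (fun i => decide (bMismatches ((PySem.Str.slice sequence (some i) (some (i + bl))).toList.zip barcode.toList) ≤ diff)) <;>
        simp [Option.or]
  · -- len(sequence) < barcode_length: no window exists, both sides scan nothing
    have e2 : PySem.List.pyRange 0 ((sequence.toList.length : Int) - bl + 1) 1 = [] :=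
      PySem.List.pyRange_one_eq_nil (by omega)
    rw [e2]
    rcases htype with h | h <;> subst h
    · rw [one_off_rt, hslen,
          show PySem.List.pyRange ((sequence.toList.length : Int) - bl) (-1) (-1) = [] from
            PySem.List.pyRange_neg_one_eq_nil (by omega)]
      rfl
    · rw [one_off_lig, hslen, e2]
      rfl
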